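-- pv_equiv track=rewrite | github.com/jinyoong/SWEA | problem/D2/1961. 숫자 배열 회전.py | revolve
-- ===== SOURCE A (Python) =====
-- def revolve(list_in, N):
--     # 90도 회전하기
--     # 2차원 배열에서 1번째 요소를 위로 읽으면 된다
--     result = []
--     for i in range(N):
--         result.append([0] * 3)
--         temp = ''
--         for j in range(-1, -(N + 1), -1):
--             temp += str(list_in[j][i])
--         result[i][0] = temp
--
--     # 180도 회전하기
--     # 2차원 배열에서 1번째 요소들의 각 값들을 거꾸로 읽되, 1번째 요소를 읽는 순서도 반대
--     for i in range(-1, -(N + 1), -1):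
--         temp = ''
--         for j in range(-1, -(N + 1), -1):
--             temp += str(list_in[i][j])
--         result[-i-1][1] = temp
--
--     # 270도 회전하기
--     for i in range(-1, -(N + 1), -1):
--         temp = ''
--         for j in range(N):
--             temp += str(list_in[j][i])
--         result[-i-1][2] = temp
--     return result
-- ===== SOURCE B (Python) =====
-- def revolve(list_in, N):
--     # Rotate the N x N matrix 90 degrees clockwise three times in succession,
--     # then join each rotated row into a digit string.
--     def rot90(m):
--         return [list(row) for row in zip(*reversed(m))]
--
--     def rows(m):
--         return [''.join(str(x) for x in row) for row in m]
--
--     r90 = rot90(list_in)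
--     r180 = rot90(r90)
--     r270 = rot90(r180)
--     s90, s180, s270 = rows(r90), rows(r180), rows(r270)
--     return [[s90[i], s180[i], s270[i]] for i in range(N)]
-- ===== Notes on version B (the rewrite author's own statement) =====
-- stated objective: simpler
-- what changed: B replaces A's three independent negative-index double loops by one rotate-90-clockwise step (zip of the reversed rows) applied three times in succession, joining each rotated row into a digit string; Pre_ restricts to the task's natural domain (exactly N x N matrices, plus any input with N <= 0 where both return []), excluding oversized matrices on which A's negative indexing happens to read three different N x N windows per rotation.
-- outside the precondition, e.g. on revolve([[1, 2], [3, 4]], 1): A returns [['3', '4', '2']], B returns [['31', '43', '24']]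
import Mathlib
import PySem

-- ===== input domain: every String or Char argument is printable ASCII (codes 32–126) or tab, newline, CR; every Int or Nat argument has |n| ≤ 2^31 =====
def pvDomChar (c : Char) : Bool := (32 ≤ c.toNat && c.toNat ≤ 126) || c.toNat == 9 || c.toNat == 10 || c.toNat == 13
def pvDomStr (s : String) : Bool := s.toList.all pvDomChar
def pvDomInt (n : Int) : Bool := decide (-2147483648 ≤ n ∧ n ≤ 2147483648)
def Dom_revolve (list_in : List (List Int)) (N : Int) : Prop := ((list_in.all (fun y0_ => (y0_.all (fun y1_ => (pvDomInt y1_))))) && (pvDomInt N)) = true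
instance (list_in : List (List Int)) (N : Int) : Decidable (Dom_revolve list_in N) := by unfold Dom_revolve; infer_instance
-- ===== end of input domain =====

-- B rotates the whole matrix 90° clockwise three times in succession instead of A's three
-- independent negative-index double loops (simpler decomposition, same O(N^2) cost).

-- ===== PORT A =====
-- result[k][c] = v  (Python: result[k][c] = v; out-of-range k would be an IndexError, excluded by Pre_)
def pvSetCell (res : List (List String)) (k : Int) (c : Nat) (v : String) : List (List String) :=
  match PySem.List.pyIdx? res.length k with
  | some n => res.set n ((res.getD n []).set c v)
  | none => res

def revolve (list_in : List (List Int)) (N : Int) : List (List String) :=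
  -- 90도 회전하기
  let result1 := (PySem.List.pyRange 0 N 1).foldl (fun res i =>
      let res := res ++ [["", "", ""]]   -- result.append([0]*3); the three placeholders are all overwritten
      let temp := (PySem.List.pyRange (-1) (-(N+1)) (-1)).foldl
          (fun t j => t ++ PySem.Int.toStr (PySem.List.pyGetD (PySem.List.pyGetD list_in j []) i 0)) ""
      pvSetCell res i 0 temp) []
  -- 180도 회전하기
  let result2 := (PySem.List.pyRange (-1) (-(N+1)) (-1)).foldl (fun res i =>
      let temp := (PySem.List.pyRange (-1) (-(N+1)) (-1)).foldl
          (fun t j => t ++ PySem.Int.toStr (PySem.List.pyGetD (PySem.List.pyGetD list_in i []) j 0)) ""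
      pvSetCell res (-i-1) 1 temp) result1
  -- 270도 회전하기
  (PySem.List.pyRange (-1) (-(N+1)) (-1)).foldl (fun res i =>
      let temp := (PySem.List.pyRange 0 N 1).foldl
          (fun t j => t ++ PySem.Int.toStr (PySem.List.pyGetD (PySem.List.pyGetD list_in j []) i 0)) ""
      pvSetCell res (-i-1) 2 temp) result2

-- ===== PORT B =====
-- zip(*rows): hand port (variadic zip), exact — stops at the shortest row, [] when rows == []
def pvZipStar (rows : List (List Int)) : List (List Int) :=
  match rows with
  | [] => []
  | r :: rs => (List.range (rs.foldl (fun a l => min a l.length) r.length)).map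
      (fun i => (r :: rs).map (fun l => l.getD i 0))

def pvRot90 (m : List (List Int)) : List (List Int) := pvZipStar m.reverse

-- rows(m): join each row's entries into one digit string
def pvRowsStr (m : List (List Int)) : List String :=
  m.map (fun row => String.join (row.map PySem.Int.toStr))

def revolve_alt (list_in : List (List Int)) (N : Int) : List (List String) :=
  let r90 := pvRot90 list_in
  let r180 := pvRot90 r90
  let r270 := pvRot90 r180
  let s90 := pvRowsStr r90
  let s180 := pvRowsStr r180
  let s270 := pvRowsStr r270
  (PySem.List.pyRange 0 N 1).map (fun i =>
    [PySem.List.pyGetD s90 i "", PySem.List.pyGetD s180 i "", PySem.List.pyGetD s270 i ""])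

-- ===== PRECONDITION & SPEC =====
-- Pre_ restricts to the task's natural domain: the matrix is exactly N × N (or N ≤ 0, where
-- both programs return []).  This excludes larger matrices on which A still returns a value:
-- there A's negative indexing happens to read three different N × N windows of the matrix,
-- one per rotation, an accident of its implementation that no caller of an 'N × N rotate'
-- would rely on.
def Pre_revolve (list_in : List (List Int)) (N : Int) : Prop :=
  N ≤ 0 ∨ (0 < N ∧ list_in.length = N.toNat ∧ ∀ row ∈ list_in, row.length = N.toNat)

instance (list_in : List (List Int)) (N : Int) : Decidable (Pre_revolve list_in N) := by
  unfold Pre_revolve; infer_instance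

def pvWitness_revolve : List (List Int) × Int := ([[1, 2], [3, 4]], 2)

def Spec_revolve (list_in : List (List Int)) (N : Int) (out : List (List String)) : Prop := out = revolve_alt list_in N
instance (list_in : List (List Int)) (N : Int) (out : List (List String)) : Decidable (Spec_revolve list_in N out) := by unfold Spec_revolve; infer_instance

-- ===== CLAIM (what is proved, stated in full; the proofs are below) =====
def Claim_equal_revolve : Prop := ∀ (list_in : List (List Int)) (N : Int), Dom_revolve list_in N → Pre_revolve list_in N → Spec_revolve list_in N (revolve list_in N)

-- ===== LEMMAS AND PROOFS =====

-- square matrix predicate used by the proofs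
def pvSq (M : List (List Int)) : Prop := ∀ row ∈ M, row.length = M.length

theorem pv_foldl_min_const (rs : List (List Int)) (L : Nat)
    (h : ∀ l ∈ rs, l.length = L) : rs.foldl (fun a l => min a l.length) L = L := by
  induction rs with
  | nil => rfl
  | cons r rs ih =>
      have hr : r.length = L := h r (by simp)
      simp only [List.foldl_cons, hr, min_self]
      exact ih (fun l hl => h l (by simp [hl]))

theorem pvRot90_formula (M : List (List Int)) (hM : pvSq M) :
    pvRot90 M = (List.range M.length).map (fun i => M.reverse.map (fun l => l.getD i 0)) := by
  unfold pvRot90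
  rcases hrev : M.reverse with _ | ⟨r, rs⟩
  · have hM0 : M = [] := by
      have := congrArg List.reverse hrev; simpa using this
    subst hM0; simp [pvZipStar]
  · have hlen : M.length = (r :: rs).length := by
      rw [← hrev]; simp
    have hall : ∀ l ∈ (r :: rs), l.length = M.length := by
      intro l hl
      have : l ∈ M := by
        rw [← List.mem_reverse, hrev]; exact hl
      exact hM l this
    have hr : r.length = M.length := hall r (by simp)
    have hmin : rs.foldl (fun a l => min a l.length) r.length = M.length := by
      rw [hr]
      exact pv_foldl_min_const rs M.length (fun l hl => hall l (by simp [hl]))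
    have hred : pvZipStar (r :: rs)
        = (List.range (rs.foldl (fun a l => min a l.length) r.length)).map
            (fun i => (r :: rs).map (fun l => l.getD i 0)) := rfl
    rw [hred, hmin]

theorem pv_len_rot90 (M : List (List Int)) (hM : pvSq M) :
    (pvRot90 M).length = M.length := by
  rw [pvRot90_formula M hM]; simp

theorem pv_row_rot90 (M : List (List Int)) (hM : pvSq M) (i : Nat) (hi : i < M.length) :
    (pvRot90 M).getD i [] = M.reverse.map (fun l => l.getD i 0) := by
  rw [pvRot90_formula M hM, List.getD_eq_getElem _ _ (by simpa using hi)]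
  simp

theorem pv_sq_rot90 (M : List (List Int)) (hM : pvSq M) : pvSq (pvRot90 M) := by
  intro row hrow
  rw [pvRot90_formula M hM] at hrow
  simp only [List.mem_map, List.mem_range] at hrow
  obtain ⟨i, _, rfl⟩ := hrow
  rw [pv_len_rot90 M hM]; simp

theorem pv_entry_rot90 (M : List (List Int)) (hM : pvSq M) (i j : Nat)
    (hi : i < M.length) (hj : j < M.length) :
    ((pvRot90 M).getD i []).getD j 0 = (M.getD (M.length - 1 - j) []).getD i 0 := by
  rw [pv_row_rot90 M hM i hi]
  have hj' : j < M.reverse.length := by simpa using hj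
  rw [List.getD_eq_getElem _ _ (by simpa using hj')]
  rw [List.getElem_map, List.getElem_reverse]
  rw [List.getD_eq_getElem M _ (by omega)]

-- foldl string building = String.join of the mapped list
theorem pv_strfold {α : Type} (l : List α) (f : α → String) :
    l.foldl (fun t x => t ++ f x) "" = String.join (l.map f) := by
  rw [String.join, List.foldl_map]

theorem pvSetCell_some (res : List (List String)) (k : Int) (c : Nat) (v : String) (n : Nat)
    (h : PySem.List.pyIdx? res.length k = some n) :
    pvSetCell res k c v = res.set n ((res.getD n []).set c v) := by
  unfold pvSetCell; rw [h]

-- set a cell of the freshly appended row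
theorem pvSetCell_append (res : List (List String)) (row : List String) (c : Nat) (v : String) :
    pvSetCell (res ++ [row]) (res.length : Int) c v = res ++ [row.set c v] := by
  have h1 : PySem.List.pyIdx? (res ++ [row]).length (res.length : Int) = some res.length := by
    simp [PySem.List.pyIdx?]
  rw [pvSetCell_some _ _ _ _ _ h1]
  have h2 : (res ++ [row]).getD res.length [] = row := by
    rw [List.getD_eq_getElem _ _ (by simp)]
    simp
  rw [h2, List.set_append_right _ _ (le_refl _)]
  simp

-- setting a cell in range, list view
theorem pvSetCell_eq (res : List (List String)) (k c : Nat) (v : String) (hk : k < res.length) :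
    pvSetCell res (k : Int) c v = res.set k ((res.getD k []).set c v) := by
  have h1 : PySem.List.pyIdx? res.length (k : Int) = some k := by
    simp [PySem.List.pyIdx?, hk]
  rw [pvSetCell_some _ _ _ _ _ h1]

-- fold of per-index cell updates over range = pointwise map
theorem pv_fold_setCell (c : Nat) (g : Nat → String) (R : List (List String)) (j : Nat)
    (hj : j ≤ R.length) :
    (List.range j).foldl (fun r (k : Nat) => pvSetCell r (↑k) c (g k)) R
    = (List.range j).map (fun k => (R.getD k []).set c (g k)) ++ R.drop j := by
  induction j with
  | zero => simp
  | succ j ih =>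
      have hj' : j ≤ R.length := Nat.le_of_succ_le hj
      have hjR : j < R.length := by omega
      rw [List.range_succ, List.foldl_append, ih hj', List.map_append]
      simp only [List.foldl_cons, List.foldl_nil, List.map_cons, List.map_nil]
      set A := (List.range j).map (fun k => (R.getD k []).set c (g k)) with hA
      have hlenA : A.length = j := by simp [hA]
      have hdrop : R.drop j = R[j] :: R.drop (j + 1) := List.drop_eq_getElem_cons hjR
      have hlen : j < (A ++ R.drop j).length := by
        simp [hlenA]; omega
      rw [pvSetCell_eq _ j c (g j) hlen]
      have hget : (A ++ R.drop j).getD j [] = R[j] := by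
        rw [List.getD_eq_getElem _ _ hlen, List.getElem_append_right (by omega)]
        simp [hlenA]
      rw [hget, hdrop, List.set_append_right _ _ (by omega : A.length ≤ j)]
      have h0 : (R[j] :: R.drop (j + 1)).set (j - A.length) (R[j].set c (g j))
          = (R[j].set c (g j)) :: R.drop (j + 1) := by
        rw [show j - A.length = 0 from by omega]
        rfl
      rw [h0]
      have hD : R.getD j [] = R[j] := List.getD_eq_getElem _ _ hjR
      rw [hD]
      simp

-- phase-1 fold: append a fresh row and set its first cell
theorem pv_fold_append_set (t : Nat → String) (j : Nat) :
    (List.range j).foldl (fun res (k : Nat) => pvSetCell (res ++ [["", "", ""]]) (↑k) 0 (t k)) []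
    = (List.range j).map (fun k => [t k, "", ""]) := by
  induction j with
  | zero => simp
  | succ j ih =>
      rw [List.range_succ, List.foldl_append, ih]
      simp only [List.foldl_cons, List.foldl_nil]
      have h := pvSetCell_append ((List.range j).map (fun k => [t k, "", ""])) ["", "", ""] 0 (t j)
      simp only [List.length_map, List.length_range] at h
      rw [h, List.map_append]
      rfl

-- getD over a map of range
theorem pv_getD_map_range {β : Type} [Inhabited β] (f : Nat → β) (n k : Nat) (hk : k < n) (d : β) :
    ((List.range n).map f).getD k d = f k := by
  rw [List.getD_eq_getElem _ _ (by simpa using hk)]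
  simp

-- second and third rotation, entrywise
theorem pv_e180 (M : List (List Int)) (hM : pvSq M) (i j : Nat)
    (hi : i < M.length) (hj : j < M.length) :
    ((pvRot90 (pvRot90 M)).getD i []).getD j 0
      = (M.getD (M.length - 1 - i) []).getD (M.length - 1 - j) 0 := by
  have sq1 := pv_sq_rot90 M hM
  have len1 := pv_len_rot90 M hM
  have h := pv_entry_rot90 (pvRot90 M) sq1 i j (by omega) (by omega)
  rw [len1] at h
  rw [h, pv_entry_rot90 M hM (M.length - 1 - j) i (by omega) hi]

theorem pv_e270 (M : List (List Int)) (hM : pvSq M) (i j : Nat)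
    (hi : i < M.length) (hj : j < M.length) :
    ((pvRot90 (pvRot90 (pvRot90 M))).getD i []).getD j 0
      = (M.getD j []).getD (M.length - 1 - i) 0 := by
  have sq1 := pv_sq_rot90 M hM
  have sq2 := pv_sq_rot90 _ sq1
  have len1 := pv_len_rot90 M hM
  have len2 : (pvRot90 (pvRot90 M)).length = M.length := by
    rw [pv_len_rot90 _ sq1, len1]
  have h := pv_entry_rot90 (pvRot90 (pvRot90 M)) sq2 i j (by omega) (by omega)
  rw [len2] at h
  rw [h, pv_e180 M hM (M.length - 1 - j) i (by omega) hi,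
      show M.length - 1 - (M.length - 1 - j) = j from by omega]

-- lengths of the rotated rows
theorem pv_rowlen (M : List (List Int)) (hM : pvSq M) (k : Nat) (hk : k < M.length) :
    (M.getD k []).length = M.length := by
  rw [List.getD_eq_getElem _ _ hk]
  exact hM _ (List.getElem_mem _)

theorem pv_rl1 (M : List (List Int)) (hM : pvSq M) (k : Nat) (hk : k < M.length) :
    ((pvRot90 M).getD k []).length = M.length := by
  have h := pv_rowlen _ (pv_sq_rot90 M hM) k (by rw [pv_len_rot90 M hM]; exact hk)
  rwa [pv_len_rot90 M hM] at h

theorem pv_rl2 (M : List (List Int)) (hM : pvSq M) (k : Nat) (hk : k < M.length) :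
    ((pvRot90 (pvRot90 M)).getD k []).length = M.length := by
  have h := pv_rl1 (pvRot90 M) (pv_sq_rot90 M hM) k (by rw [pv_len_rot90 M hM]; exact hk)
  rwa [pv_len_rot90 M hM] at h

theorem pv_rl3 (M : List (List Int)) (hM : pvSq M) (k : Nat) (hk : k < M.length) :
    ((pvRot90 (pvRot90 (pvRot90 M))).getD k []).length = M.length := by
  have h := pv_rl2 (pvRot90 M) (pv_sq_rot90 M hM) k (by rw [pv_len_rot90 M hM]; exact hk)
  rwa [pv_len_rot90 M hM] at h

-- the rotated rows, written entrywise over the base matrix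
theorem pv_rotRow1 (M : List (List Int)) (hM : pvSq M) (k : Nat) (hk : k < M.length) :
    (pvRot90 M).getD k []
      = (List.range M.length).map (fun j => (M.getD (M.length - 1 - j) []).getD k 0) := by
  apply List.ext_getElem (by simp only [List.length_map, List.length_range]; exact pv_rl1 M hM k hk)
  intro j hj _
  have hjn : j < M.length := by
    have := pv_rl1 M hM k hk; omega
  simp only [List.getElem_map, List.getElem_range]
  rw [← pv_entry_rot90 M hM k j hk hjn]
  exact (List.getD_eq_getElem _ 0 hj).symm

theorem pv_rotRow2 (M : List (List Int)) (hM : pvSq M) (k : Nat) (hk : k < M.length) :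
    (pvRot90 (pvRot90 M)).getD k []
      = (List.range M.length).map
          (fun j => (M.getD (M.length - 1 - k) []).getD (M.length - 1 - j) 0) := by
  apply List.ext_getElem (by simp only [List.length_map, List.length_range]; exact pv_rl2 M hM k hk)
  intro j hj _
  have hjn : j < M.length := by
    have := pv_rl2 M hM k hk; omega
  simp only [List.getElem_map, List.getElem_range]
  rw [← pv_e180 M hM k j hk hjn]
  exact (List.getD_eq_getElem _ 0 hj).symm

theorem pv_rotRow3 (M : List (List Int)) (hM : pvSq M) (k : Nat) (hk : k < M.length) :
    (pvRot90 (pvRot90 (pvRot90 M))).getD k []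
      = (List.range M.length).map (fun j => (M.getD j []).getD (M.length - 1 - k) 0) := by
  apply List.ext_getElem (by simp only [List.length_map, List.length_range]; exact pv_rl3 M hM k hk)
  intro j hj _
  have hjn : j < M.length := by
    have := pv_rl3 M hM k hk; omega
  simp only [List.getElem_map, List.getElem_range]
  rw [← pv_e270 M hM k j hk hjn]
  exact (List.getD_eq_getElem _ 0 hj).symm

-- negative Python indexing, rewritten to getD
theorem pv_negRow (m : List (List Int)) (j : Nat) (hj : j < m.length) :
    PySem.List.pyGetD m (-1 - (j : Int)) [] = m.getD (m.length - 1 - j) [] := by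
  rw [show (-1 - (j : Int)) = -((j + 1 : Nat) : Int) from by push_cast; ring,
      PySem.List.pyGetD_neg_natCast m (j + 1) [] (by omega) (by omega),
      List.getD_eq_getElem m _ (by omega : m.length - 1 - j < m.length)]
  congr 1
  omega

theorem pv_negCell (row : List Int) (j : Nat) (hj : j < row.length) :
    PySem.List.pyGetD row (-1 - (j : Int)) 0 = row.getD (row.length - 1 - j) 0 := by
  rw [show (-1 - (j : Int)) = -((j + 1 : Nat) : Int) from by push_cast; ring,
      PySem.List.pyGetD_neg_natCast row (j + 1) 0 (by omega) (by omega),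
      List.getD_eq_getElem row 0 (by omega : row.length - 1 - j < row.length)]
  congr 1
  omega

-- getD through pvRowsStr
theorem pv_getD_rowsStr (m : List (List Int)) (k : Nat) (hk : k < m.length) :
    (pvRowsStr m).getD k "" = String.join ((m.getD k []).map PySem.Int.toStr) := by
  unfold pvRowsStr
  rw [List.getD_eq_getElem _ _ (by simpa using hk), List.getElem_map,
      List.getD_eq_getElem m _ hk]

-- ===== VERDICT (by name: the statement is the Claim_ definition above) =====
theorem revolve_spec : Claim_equal_revolve := by
  intro m N _hdom hpre
  unfold Spec_revolve
  rcases hpre with hN0 | ⟨hNpos, hNL, hrows⟩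
  · -- N ≤ 0: every loop is empty, both sides return []
    have h1 : PySem.List.pyRange 0 N 1 = [] := PySem.List.pyRange_one_eq_nil hN0
    have h2 : PySem.List.pyRange (-1) (-1 + -N) (-1) = [] := by
      rw [PySem.List.pyRange_neg_one, show ((-1 : Int) - (-1 + -N)).toNat = 0 from by omega]
      simp
    simp [revolve, revolve_alt, h1, h2]
  · obtain ⟨n, rfl⟩ : ∃ n : Nat, N = (n : Int) :=
      ⟨N.toNat, (Int.toNat_of_nonneg (by omega)).symm⟩
    rw [Int.toNat_natCast] at hNL hrows
    have hn0 : 0 < n := by exact_mod_cast hNpos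
    have hM : pvSq m := by
      intro row hr; rw [hrows row hr, hNL]
    have hrlen : ∀ k, k < n → (m.getD k []).length = n := by
      intro k hk
      have := pv_rowlen m hM k (by omega)
      rw [hNL] at this; exact this
    -- entrywise bridges between A's negative-index reads and the rotated rows
    have c1 : ∀ k j, k < n → j < n →
        (PySem.List.pyGetD m (-1 - (j : Int)) []).getD k 0
          = (m.getD (n - 1 - j) []).getD k 0 := by
      intro k j hk hj
      rw [pv_negRow m j (by omega), hNL]
    have c2 : ∀ k j, k < n → j < n →
        PySem.List.pyGetD (PySem.List.pyGetD m (-1 - (k : Int)) []) (-1 - (j : Int)) 0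
          = (m.getD (n - 1 - k) []).getD (n - 1 - j) 0 := by
      intro k j hk hj
      rw [pv_negRow m k (by omega), hNL,
          pv_negCell (m.getD (n - 1 - k) []) j (by rw [hrlen (n - 1 - k) (by omega)]; omega),
          hrlen (n - 1 - k) (by omega)]
    have c3 : ∀ k j, k < n → j < n →
        PySem.List.pyGetD (m.getD j []) (-1 - (k : Int)) 0
          = (m.getD j []).getD ((m.getD j []).length - 1 - k) 0 := by
      intro k j hk hj
      exact pv_negCell (m.getD j []) k (by rw [hrlen j hj]; omega)
    -- loop normalisation
    have hrange0 : PySem.List.pyRange 0 ((n : Nat) : Int) 1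
        = (List.range n).map (fun (k : Nat) => (k : Int)) :=
      PySem.List.pyRange_zero_natCast n
    have hrangeneg : PySem.List.pyRange (-1) (-((n : Int) + 1)) (-1)
        = (List.range n).map (fun (k : Nat) => -1 - (k : Int)) := by
      rw [PySem.List.pyRange_neg_one,
          show ((-1 : Int) - -((n : Int) + 1)).toNat = n from by omega]
    have hidx : ∀ (k : Nat), (-(-1 - (k : Int)) - 1) = (k : Int) := by
      intro k; ring
    have hdropnil : ∀ (f : Nat → List String),
        ((List.range n).map f).drop n = [] := by
      intro f
      exact List.drop_eq_nil_of_le (by simp)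
    simp only [revolve, revolve_alt]
    simp only [hrange0, hrangeneg, List.foldl_map, List.map_map]
    simp only [hidx]
    rw [pv_fold_append_set]
    rw [pv_fold_setCell 1 _ _ n (by simp)]
    simp only [hdropnil, List.append_nil]
    rw [pv_fold_setCell 2 _ _ n (by simp)]
    simp only [hdropnil, List.append_nil]
    apply List.map_congr_left
    intro k hk
    simp only [List.mem_range] at hk
    rw [pv_getD_map_range _ _ _ hk]
    rw [pv_getD_map_range _ _ _ hk]
    simp only [Function.comp_apply, PySem.List.pyGetD_natCast]
    simp only [pv_strfold]
    rw [pv_getD_rowsStr _ k (by rw [pv_len_rot90 m hM, hNL]; exact hk)]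
    rw [pv_getD_rowsStr _ k (by
          rw [pv_len_rot90 _ (pv_sq_rot90 m hM), pv_len_rot90 m hM, hNL]; exact hk)]
    rw [pv_getD_rowsStr _ k (by
          rw [pv_len_rot90 _ (pv_sq_rot90 _ (pv_sq_rot90 m hM)),
              pv_len_rot90 _ (pv_sq_rot90 m hM), pv_len_rot90 m hM, hNL]; exact hk)]
    rw [pv_rotRow1 m hM k (by omega), pv_rotRow2 m hM k (by omega),
        pv_rotRow3 m hM k (by omega), hNL]
    simp only [List.map_map]
    simp only [List.set_cons_succ, List.set_cons_zero]
    simp only [List.cons.injEq, and_true]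
    refine ⟨?_, ?_, ?_⟩
    · refine congrArg String.join (List.map_congr_left ?_)
      intro j hj
      simp only [List.mem_range] at hj
      simp only [Function.comp_apply]
      exact congrArg PySem.Int.toStr (c1 k j hk hj)
    · refine congrArg String.join (List.map_congr_left ?_)
      intro j hj
      simp only [List.mem_range] at hj
      simp only [Function.comp_apply]
      exact congrArg PySem.Int.toStr (c2 k j hk hj)
    · refine congrArg String.join (List.map_congr_left ?_)
      intro j hj
      simp only [List.mem_range] at hj
      simp only [Function.comp_apply]
      rw [c3 k j hk hj, hrlen j hj]
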